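-- pv_equiv track=rewrite | github.com/boknowswiki/mytraning | lintcode/python/1365_minimum_cycle_section.py | minimumCycleSection
-- ===== SOURCE A (Python) =====
-- def minimumCycleSection(array):
--     # Write your code here
--     n = len(array)
--     next = [0] * (n+1)
--     i = 0
--     j = -1
--     next[0] = -1
--
--     while i < n:
--         if j == -1 or array[i] == array[j]:
--             i += 1
--             j += 1
--             next[i] = j
--         else:
--             j = next[j]
--
--     return i - next[i]
-- ===== SOURCE B (Python) =====
-- def minimumCycleSection(array):
--     n = len(array)
--     for d in range(1, n + 1):
--         if all(array[i] == array[i - d] for i in range(d, n)):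
--             return d
--     return 1
-- ===== Notes on version B (the rewrite author's own statement) =====
-- stated objective: simpler
-- what changed: Replaced the KMP failure-function loop (prefix table, i/j pointers, n - next[n]) by a direct search for the smallest period d such that array[i] == array[i-d] for all i in [d, n).
import Mathlib
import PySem

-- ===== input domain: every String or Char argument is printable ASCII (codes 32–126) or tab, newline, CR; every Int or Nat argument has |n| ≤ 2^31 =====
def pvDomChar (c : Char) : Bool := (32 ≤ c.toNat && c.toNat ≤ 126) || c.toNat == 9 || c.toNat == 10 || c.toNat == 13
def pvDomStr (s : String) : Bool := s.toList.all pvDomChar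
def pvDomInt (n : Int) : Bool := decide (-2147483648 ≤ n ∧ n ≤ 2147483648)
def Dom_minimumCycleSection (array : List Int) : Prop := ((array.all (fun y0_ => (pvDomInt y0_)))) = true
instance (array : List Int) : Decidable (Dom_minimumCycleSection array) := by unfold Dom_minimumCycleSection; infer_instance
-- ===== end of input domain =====

-- B replaces A's KMP failure-function computation by a direct search for the smallest period d
-- with array[i] == array[i-d] for all i in [d, n); objective: simpler (not faster).

-- ===== PORT A =====
-- A's while-loop as recursion on fuel; fuel 2*n+2 is proved sufficient below (the loop measure
-- 2*(n-i) + (j+1) starts at 2*n and strictly decreases).  array[i], array[j] and next[j] are read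
-- with getD: the invariant proved below shows all these indices are in range (and j ≥ 0 where it
-- is used as an index), so getD is exact here.  next[i+1] = j+1 is List.set, in range likewise.
def aLoop (s : List Int) (n : Nat) : Nat → Nat → Int → List Int → Nat × Int × List Int
  | 0, i, j, nxt => (i, j, nxt)
  | fuel+1, i, j, nxt =>
    if i < n then
      if j == -1 || s.getD i 0 == s.getD j.toNat 0 then
        aLoop s n fuel (i+1) (j+1) (nxt.set (i+1) (j+1))
      else
        aLoop s n fuel i (nxt.getD j.toNat 0) nxt
    else (i, j, nxt)

def minimumCycleSection (array : List Int) : Int :=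
  let n := array.length
  let nxt0 := (List.replicate (n+1) (0:Int)).set 0 (-1)
  let r := aLoop array n (2*n+2) 0 (-1) nxt0
  (r.1 : Int) - r.2.2.getD r.1 0

-- ===== PORT B =====
-- all(array[i] == array[i - d] for i in range(d, n)) ; range(d, n) ported as List.range' d (n-d),
-- exact for every d (empty when d ≥ n); indices i and i-d lie in [0, n) so getD is exact.
def altCheck (s : List Int) (d : Nat) : Bool :=
  (List.range' d (s.length - d)).all (fun i => s.getD i 0 == s.getD (i - d) 0)

-- for d in range(1, n+1): … ; the final `return 1` is the 0-fuel case.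
def altLoop (s : List Int) : Nat → Nat → Int
  | _, 0 => 1
  | d, k+1 => if altCheck s d then (d : Int) else altLoop s (d+1) k

def minimumCycleSection_alt (array : List Int) : Int := altLoop array 1 array.length

-- ===== PRECONDITION & SPEC =====
def Spec_minimumCycleSection (array : List Int) (out : Int) : Prop := out = minimumCycleSection_alt array
instance (array : List Int) (out : Int) : Decidable (Spec_minimumCycleSection array out) := by unfold Spec_minimumCycleSection; infer_instance

-- ===== CLAIM (what is proved, stated in full; the proofs are below) =====
def Claim_equal_minimumCycleSection : Prop := ∀ (array : List Int), Dom_minimumCycleSection array → Spec_minimumCycleSection array (minimumCycleSection array)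

-- ===== LEMMAS AND PROOFS =====

-- k is a border length of the prefix of length i: s[t] = s[i-k+t] for all t < k.
def brdB (s : List Int) (i k : Nat) : Bool :=
  decide (k ≤ i) && (List.range k).all (fun t => s.getD t 0 == s.getD (i - k + t) 0)

theorem brdB_iff (s : List Int) (i k : Nat) :
    brdB s i k = true ↔ k ≤ i ∧ ∀ t, t < k → s.getD t 0 = s.getD (i - k + t) 0 := by
  simp [brdB, List.all_eq_true]

-- longest proper border of the prefix of length i (0 when i ≤ 1).
def Fb (s : List Int) (i : Nat) : Nat :=
  Nat.findGreatest (fun k => (decide (k < i) && brdB s i k) = true) i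

theorem brdB_zero (s : List Int) (i : Nat) : brdB s i 0 = true := by
  simp [brdB]

theorem Fb_spec (s : List Int) (i : Nat) (hi : 1 ≤ i) :
    Fb s i < i ∧ brdB s i (Fb s i) = true := by
  have h := Nat.findGreatest_spec (P := fun k => (decide (k < i) && brdB s i k) = true)
    (m := 0) (n := i) (Nat.zero_le i) (by simp [brdB_zero]; omega)
  simpa [Fb] using h

theorem Fb_le (s : List Int) (i k : Nat) (hk : k < i) (hb : brdB s i k = true) :
    k ≤ Fb s i :=
  Nat.le_findGreatest (le_of_lt hk) (by simp [hk, hb])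

-- border extension: k border of prefix i and s[k] = s[i]  →  k+1 border of prefix i+1
theorem brd_extend (s : List Int) (i k : Nat) (hk : k < i)
    (hb : brdB s i k = true) (he : s.getD k 0 = s.getD i 0) :
    brdB s (i+1) (k+1) = true := by
  rw [brdB_iff] at hb ⊢
  obtain ⟨hki, hall⟩ := hb
  refine ⟨by omega, fun t ht => ?_⟩
  by_cases htk : t < k
  · have := hall t htk
    have : s.getD t 0 = s.getD (i - k + t) 0 := this
    have harith : i + 1 - (k + 1) + t = i - k + t := by omega
    rw [harith]; exact this
  · have htk' : t = k := by omega
    rw [htk']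
    have harith : i + 1 - (k + 1) + k = i := by omega
    rw [harith]; exact he

-- border restriction: k ≥ 1 border of prefix i+1 → k-1 border of prefix i, and s[k-1] = s[i]
theorem brd_restrict (s : List Int) (i k : Nat) (hk1 : 1 ≤ k) (hki : k ≤ i)
    (hb : brdB s (i+1) k = true) :
    brdB s i (k-1) = true ∧ s.getD (k-1) 0 = s.getD i 0 := by
  rw [brdB_iff] at hb
  obtain ⟨_, hall⟩ := hb
  constructor
  · rw [brdB_iff]
    refine ⟨by omega, fun t ht => ?_⟩
    have := hall t (by omega)
    have harith : i + 1 - k + t = i - (k - 1) + t := by omega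
    rw [harith] at this; exact this
  · have := hall (k-1) (by omega)
    have harith : i + 1 - k + (k - 1) = i := by omega
    rw [harith] at this; exact this

-- border of a border is a border
theorem brd_trans_up (s : List Int) (i j k : Nat) (hk : brdB s j k = true)
    (hj : brdB s i j = true) : brdB s i k = true := by
  rw [brdB_iff] at hk hj ⊢
  obtain ⟨hkj, hka⟩ := hk
  obtain ⟨hji, hja⟩ := hj
  refine ⟨by omega, fun t ht => ?_⟩
  have h1 := hka t ht
  have hj0 : 0 < j := by omega
  have h2 := hja (j - k + t) (by omega)
  have harith : i - j + (j - k + t) = i - k + t := by omega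
  rw [harith] at h2
  rw [h1, ← h2]

-- two borders of the same prefix: the shorter is a border of the longer
theorem brd_trans_down (s : List Int) (i j k : Nat) (hkj : k < j)
    (hk : brdB s i k = true) (hj : brdB s i j = true) : brdB s j k = true := by
  rw [brdB_iff] at hk hj ⊢
  obtain ⟨hki, hka⟩ := hk
  obtain ⟨hji, hja⟩ := hj
  refine ⟨by omega, fun t ht => ?_⟩
  have h1 := hka t ht
  have h2 := hja (j - k + t) (by omega)
  have harith : i - j + (j - k + t) = i - k + t := by omega
  rw [harith] at h2
  rw [h1, ← h2]

-- loop invariant of A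
def KInv (s : List Int) (i : Nat) (j : Int) (nxt : List Int) : Prop :=
  i ≤ s.length ∧ nxt.length = s.length + 1 ∧ nxt.getD 0 0 = -1 ∧
  (∀ t, 1 ≤ t → t ≤ i → nxt.getD t 0 = (Fb s t : Int)) ∧
  (j = -1 ∨ (0 ≤ j ∧ j < (i : Int) ∧ brdB s i j.toNat = true)) ∧
  (∀ k : Nat, k < i → brdB s i k = true → j < (k : Int) → ¬ (s.getD k 0 = s.getD i 0))


theorem getD_set_ne' (l : List Int) (m n : Nat) (a d : Int) (h : m ≠ n) :
    (l.set m a).getD n d = l.getD n d := by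
  simp [List.getD, List.getElem?_set_ne h]

theorem getD_set_self' (l : List Int) (n : Nat) (a d : Int) (h : n < l.length) :
    (l.set n a).getD n d = a := by
  simp [List.getD, List.getElem?_set_self h]

theorem aLoop_ok (s : List Int) : ∀ (fuel i : Nat) (j : Int) (nxt : List Int),
    KInv s i j nxt → 2*(s.length - i) + (j+1).toNat < fuel →
    ∃ j' nxt', aLoop s s.length fuel i j nxt = (s.length, j', nxt') ∧ KInv s s.length j' nxt' := by
  intro fuel
  induction fuel with
  | zero => intro i j nxt _ hf; omega
  | succ fuel ih =>
    intro i j nxt hInv hf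
    obtain ⟨hin, hlen, h0, hb, hc, hd⟩ := hInv
    by_cases hi : i < s.length
    · simp only [aLoop, hi, if_true]
      have hjm1 : -1 ≤ j := by rcases hc with h | h <;> omega
      by_cases hcond : (j == -1 || s.getD i 0 == s.getD j.toNat 0) = true
      · -- match branch: i += 1; j += 1; next[i] = j
        simp only [hcond, if_true]
        have hcond' : j = -1 ∨ s.getD i 0 = s.getD j.toNat 0 := by
          rw [Bool.or_eq_true, beq_iff_eq, beq_iff_eq] at hcond
          exact hcond
        -- the new border length
        have hjn : ((j+1).toNat : Int) = j + 1 := by omega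
        have hji : j < (i : Int) := by rcases hc with h | h <;> omega
        have hbrd1 : brdB s (i+1) (j+1).toNat = true := by
          rcases hc with h | ⟨h0j, hji', hbj⟩
          · subst h
            simpa using brdB_zero s (i+1)
          · rcases hcond' with h | heq
            · omega
            · have := brd_extend s i j.toNat (by omega) hbj heq.symm
              have harith : (j+1).toNat = j.toNat + 1 := by omega
              rw [harith]; exact this
        have hmax : ∀ k : Nat, k < i + 1 → brdB s (i+1) k = true → k ≤ (j+1).toNat := by
          intro k hk hbk
          by_contra hgt
          have hk1 : 1 ≤ k := by omega
          obtain ⟨hbr, hbe⟩ := brd_restrict s i k hk1 (by omega) hbk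
          exact hd (k-1) (by omega) hbr (by omega) hbe
        have hFb : Fb s (i+1) = (j+1).toNat := by
          obtain ⟨hlt, hsp⟩ := Fb_spec s (i+1) (by omega)
          have h1 := hmax _ hlt hsp
          have h2 := Fb_le s (i+1) (j+1).toNat (by omega) hbrd1
          omega
        have hKInv : KInv s (i+1) (j+1) (nxt.set (i+1) (j+1)) := by
          refine ⟨by omega, by simp [hlen], ?_, ?_, ?_, ?_⟩
          · rw [getD_set_ne' _ _ _ _ _ (by omega)]; exact h0
          · intro t ht1 ht2
            by_cases hti : t ≤ i
            · rw [getD_set_ne' _ _ _ _ _ (by omega)]; exact hb t ht1 hti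
            · have hte : t = i + 1 := by omega
              subst hte
              rw [getD_set_self' _ _ _ _ (by omega), hFb, hjn]
          · right
            exact ⟨by omega, by omega, by simpa [hjn] using hbrd1⟩
          · intro k hk hbk hklt
            have := hmax k hk hbk
            intro _
            omega
        exact ih (i+1) (j+1) _ hKInv (by omega)
      · -- mismatch branch: j = next[j]
        simp only [hcond]
        have hcond' : ¬ j = -1 ∧ ¬ s.getD i 0 = s.getD j.toNat 0 := by
          rw [Bool.or_eq_true, beq_iff_eq, beq_iff_eq] at hcond
          push Not at hcond
          exact hcond
        obtain ⟨hjne, hne⟩ := hcond'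
        rcases hc with h | ⟨h0j, hji', hbj⟩
        · exact absurd h hjne
        have hKInv : KInv s i (nxt.getD j.toNat 0) nxt ∧ nxt.getD j.toNat 0 < j ∧ -1 ≤ nxt.getD j.toNat 0 := by
          by_cases hj0 : j.toNat = 0
          · have hjz : j = 0 := by omega
            have hval : nxt.getD j.toNat 0 = -1 := by rw [hj0]; exact h0
            rw [hval]
            refine ⟨⟨hin, hlen, h0, hb, Or.inl rfl, ?_⟩, by omega, by omega⟩
            intro k hk hbk hklt heq
            by_cases hkz : k = 0
            · subst hkz
              exact hne (by rw [hj0]; exact heq.symm)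
            · exact hd k hk hbk (by omega) heq
          · have hval : nxt.getD j.toNat 0 = (Fb s j.toNat : Int) :=
              hb j.toNat (by omega) (by omega)
            obtain ⟨hglt, hgb⟩ := Fb_spec s j.toNat (by omega)
            rw [hval]
            refine ⟨⟨hin, hlen, h0, hb, ?_, ?_⟩, by omega, by omega⟩
            · right
              refine ⟨by omega, by omega, ?_⟩
              have : (Fb s j.toNat : Int).toNat = Fb s j.toNat := by omega
              rw [this]
              exact brd_trans_up s i j.toNat (Fb s j.toNat) hgb hbj
            · intro k hk hbk hklt heq
              rcases lt_trichotomy k j.toNat with hlt | heqk | hgt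
              · have hbk' := brd_trans_down s i j.toNat k hlt hbk hbj
                have := Fb_le s j.toNat k hlt hbk'
                omega
              · subst heqk
                exact hne heq.symm
              · exact hd k hk hbk (by omega) heq
        obtain ⟨hI, hdec, hge⟩ := hKInv
        exact ih i (nxt.getD j.toNat 0) nxt hI (by omega)
    · have hieq : i = s.length := by omega
      subst hieq
      simp only [aLoop, hi, if_false]
      exact ⟨j, nxt, rfl, hin, hlen, h0, hb, hc, hd⟩

theorem A_eval (s : List Int) :
    minimumCycleSection s = if s.length = 0 then 1 else (s.length : Int) - (Fb s s.length : Int) := by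
  have hI0 : KInv s 0 (-1) ((List.replicate (s.length+1) (0:Int)).set 0 (-1)) := by
    refine ⟨by omega, by simp, ?_, ?_, Or.inl rfl, ?_⟩
    · exact getD_set_self' _ _ _ _ (by simp)
    · intro t ht1 ht2; omega
    · intro k hk; omega
  obtain ⟨j', nxt', heq, hin, hlen, h0, hb, hc, hd⟩ :=
    aLoop_ok s (2*s.length+2) 0 (-1) _ hI0 (by omega)
  show (((aLoop s s.length (2*s.length+2) 0 (-1)
      ((List.replicate (s.length+1) (0:Int)).set 0 (-1))).1 : Nat) : Int)
      - (aLoop s s.length (2*s.length+2) 0 (-1)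
      ((List.replicate (s.length+1) (0:Int)).set 0 (-1))).2.2.getD
        (aLoop s s.length (2*s.length+2) 0 (-1)
      ((List.replicate (s.length+1) (0:Int)).set 0 (-1))).1 0 = _
  rw [heq]
  by_cases hn : s.length = 0
  · simp only [hn, if_true]
    rw [h0]
    omega
  · simp only [hn, if_false]
    rw [hb s.length (by omega) (le_refl _)]

theorem altCheck_iff (s : List Int) (d : Nat) (hd : 1 ≤ d) (hdn : d ≤ s.length) :
    altCheck s d = true ↔ brdB s s.length (s.length - d) = true := by
  rw [brdB_iff]
  simp only [altCheck, List.all_eq_true, List.mem_range'_1, beq_iff_eq]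
  constructor
  · intro h
    refine ⟨by omega, fun t ht => ?_⟩
    have := h (d + t) ⟨by omega, by omega⟩
    have h1 : d + t - d = t := by omega
    have h2 : s.length - (s.length - d) + t = d + t := by omega
    rw [h1] at this
    rw [h2]
    exact this.symm
  · intro ⟨_, h⟩
    intro i ⟨hi1, hi2⟩
    have := h (i - d) (by omega)
    have h2 : s.length - (s.length - d) + (i - d) = i := by omega
    rw [h2] at this
    exact this.symm

theorem altLoop_eq (s : List Int) : ∀ (k d m : Nat), d ≤ m → m < d + k →
    altCheck s m = true → (∀ e, d ≤ e → e < m → altCheck s e = false) →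
    altLoop s d k = (m : Int) := by
  intro k
  induction k with
  | zero => intro d m h1 h2 _ _; omega
  | succ k ih =>
    intro d m h1 h2 hm hmin
    by_cases hdm : d = m
    · subst hdm
      simp [altLoop, hm]
    · have hck : altCheck s d = false := hmin d (le_refl _) (by omega)
      simp only [altLoop, hck, Bool.false_eq_true, if_false]
      exact ih (d+1) m (by omega) (by omega) hm (fun e he1 he2 => hmin e (by omega) he2)

-- ===== VERDICT (by name: the statement is the Claim_ definition above) =====
theorem minimumCycleSection_spec : Claim_equal_minimumCycleSection := by
  unfold Claim_equal_minimumCycleSection Spec_minimumCycleSection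
  intro s _
  rw [A_eval]
  by_cases hn : s.length = 0
  · simp [hn, minimumCycleSection_alt, altLoop]
  · simp only [hn, if_false]
    obtain ⟨hFlt, hFb⟩ := Fb_spec s s.length (by omega)
    have hm1 : 1 ≤ s.length - Fb s s.length := by omega
    have hmc : altCheck s (s.length - Fb s s.length) = true := by
      rw [altCheck_iff s _ hm1 (by omega)]
      have : s.length - (s.length - Fb s s.length) = Fb s s.length := by omega
      rw [this]
      exact hFb
    have hmin : ∀ e, 1 ≤ e → e < s.length - Fb s s.length → altCheck s e = false := by
      intro e he1 he2
      by_contra hcontra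
      have hce : altCheck s e = true := by
        cases h : altCheck s e
        · exact absurd h hcontra
        · rfl
      rw [altCheck_iff s e he1 (by omega)] at hce
      have := Fb_le s s.length (s.length - e) (by omega) hce
      omega
    have hB : minimumCycleSection_alt s = ((s.length - Fb s s.length : Nat) : Int) := by
      show altLoop s 1 s.length = _
      exact altLoop_eq s s.length 1 _ hm1 (by omega) hmc
        (fun e he1 he2 => hmin e he1 he2)
    rw [hB]
    omega
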